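-- pv_equiv track=rewrite | github.com/fahimfaisalsami/trade-signal-value-export | main_formated_output.py | clean_float_string
-- ===== SOURCE A (Python) =====
-- def clean_float_string(s):
--     # Define valid characters for a floating-point number
--     valid_chars = set("0123456789.-")
--
--     # Iterate through each character in the string until a non-valid character or a second decimal point is encountered
--     cleaned_chars = []
--     decimal_point_seen = False
--     for char in s:
--         if char in valid_chars:
--             if char == '.':
--                 if decimal_point_seen:
--                     break  # Stop iteration if a second decimal point is encountered
--                 decimal_point_seen = True
--             cleaned_chars.append(char)
--         else:
--             break  # Stop iteration if a non-valid character is encountered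
--
--     # Return the cleaned string
--     return ''.join(cleaned_chars)
-- ===== SOURCE B (Python) =====
-- def clean_float_string(s):
--     # Two-phase scan: digits/minus before an optional single dot, then digits/minus after it.
--     valid = "0123456789-"
--     n = len(s)
--     i = 0
--     while i < n and s[i] in valid:
--         i += 1
--     if i < n and s[i] == '.':
--         j = i + 1
--         while j < n and s[j] in valid:
--             j += 1
--         return s[:j]
--     return s[:i]
-- ===== Notes on version B (the rewrite author's own statement) =====
-- stated objective: simpler
-- what changed: Replaces A's single loop with a break flag and an accumulator list by two plain index scans (digits/minus before an optional single dot, then after it) and one slice of the input.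
import Mathlib
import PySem

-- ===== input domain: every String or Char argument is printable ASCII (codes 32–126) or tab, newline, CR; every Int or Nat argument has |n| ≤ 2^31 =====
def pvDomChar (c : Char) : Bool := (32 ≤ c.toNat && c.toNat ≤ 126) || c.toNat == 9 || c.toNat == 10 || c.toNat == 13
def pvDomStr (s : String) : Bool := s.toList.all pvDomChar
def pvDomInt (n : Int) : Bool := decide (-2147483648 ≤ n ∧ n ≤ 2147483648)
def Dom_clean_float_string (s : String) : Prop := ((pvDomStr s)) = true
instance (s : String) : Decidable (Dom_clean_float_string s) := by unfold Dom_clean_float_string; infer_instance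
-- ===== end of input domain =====

-- B replaces A's flag-carrying accumulator loop by two independent index scans around one optional dot; objective: simpler.

-- ===== PORT A =====
-- A's for-loop with `decimal_point_seen` and `break`, as structural recursion over the chars
def cfsLoop : List Char → Bool → List Char → List Char
  | [], _, acc => acc.reverse
  | c :: rest, seen, acc =>
    if ("0123456789.-".toList).contains c then
      if c = '.' then
        if seen then acc.reverse
        else cfsLoop rest true (c :: acc)
      else cfsLoop rest seen (c :: acc)
    else acc.reverse

def clean_float_string (s : String) : String :=
  String.mk (cfsLoop s.toList false [])

-- ===== PORT B =====
-- one `while i < n and s[i] in valid` scan: (scanned prefix s[:i], remainder s[i:])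
def cfsSpan : List Char → List Char × List Char
  | [] => ([], [])
  | c :: rest =>
    if ("0123456789-".toList).contains c then
      let (p, r) := cfsSpan rest
      (c :: p, r)
    else ([], c :: rest)

def clean_float_string_alt (s : String) : String :=
  let (p, r) := cfsSpan s.toList
  match r with
  | '.' :: r2 => String.mk (p ++ '.' :: (cfsSpan r2).1)
  | _ => String.mk p

-- ===== PRECONDITION & SPEC =====
def Spec_clean_float_string (s : String) (out : String) : Prop := out = clean_float_string_alt s
instance (s : String) (out : String) : Decidable (Spec_clean_float_string s out) := by unfold Spec_clean_float_string; infer_instance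

-- ===== CLAIM (what is proved, stated in full; the proofs are below) =====
def Claim_equal_clean_float_string : Prop := ∀ (s : String), Dom_clean_float_string s → Spec_clean_float_string s (clean_float_string s)

-- ===== LEMMAS AND PROOFS =====

-- B's result on a raw char list
def cfsAlt (cs : List Char) : List Char :=
  let (p, r) := cfsSpan cs
  match r with
  | '.' :: r2 => p ++ '.' :: (cfsSpan r2).1
  | _ => p

-- a char is in "0123456789.-" iff it is '.' or in "0123456789-"
theorem cfs_char_mem (c : Char) :
    ("0123456789.-".toList).contains c = ((c == '.') || ("0123456789-".toList).contains c) := by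
  have h1 : "0123456789.-".toList = ['0','1','2','3','4','5','6','7','8','9','.','-'] := by decide
  have h2 : "0123456789-".toList = ['0','1','2','3','4','5','6','7','8','9','-'] := by decide
  rw [h1, h2]
  simp only [List.contains_cons, List.contains_nil]
  cases hb : (c == '.') <;> simp [hb]

-- after the dot has been seen, A's loop is exactly B's second scan
theorem cfsLoop_true (cs : List Char) : ∀ acc,
    cfsLoop cs true acc = acc.reverse ++ (cfsSpan cs).1 := by
  induction cs with
  | nil => intro acc; simp [cfsLoop, cfsSpan]
  | cons c rest ih =>
    intro acc
    by_cases h : c = '.'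
    · subst h
      simp only [cfsLoop, cfsSpan, cfs_char_mem]
      rw [if_neg (by decide : ¬ (("0123456789-".toList).contains '.') = true)]
      simp
    · cases h2 : ("0123456789-".toList).contains c with
      | true => simp only [cfsLoop, cfsSpan, cfs_char_mem, h2, h]; simp [ih, h]
      | false => simp only [cfsLoop, cfsSpan, cfs_char_mem, h2, h]; simp [h]

-- before the dot, A's loop equals B's span-then-dot decomposition
theorem cfsLoop_false (cs : List Char) : ∀ acc,
    cfsLoop cs false acc = acc.reverse ++ cfsAlt cs := by
  induction cs with
  | nil => intro acc; simp [cfsLoop, cfsSpan, cfsAlt]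
  | cons c rest ih =>
    intro acc
    by_cases h : c = '.'
    · subst h
      simp only [cfsLoop, cfsSpan, cfsAlt, cfs_char_mem]
      rw [if_neg (by decide : ¬ (("0123456789-".toList).contains '.') = true)]
      simp [cfsLoop_true]
    · cases h2 : ("0123456789-".toList).contains c with
      | true =>
        simp only [cfsLoop, cfsSpan, cfsAlt, cfs_char_mem, h2, h]
        simp [ih, h, cfsAlt]
        rcases cfsSpan rest with ⟨p, r⟩
        cases r with
        | nil => simp
        | cons d r2 => by_cases hd : d = '.' <;> simp [hd]
      | false => simp only [cfsLoop, cfsSpan, cfsAlt, cfs_char_mem, h2, h]; simp [h]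

-- ===== VERDICT (by name: the statement is the Claim_ definition above) =====
theorem clean_float_string_spec : Claim_equal_clean_float_string := by
  intro s _
  unfold Spec_clean_float_string clean_float_string clean_float_string_alt
  rw [cfsLoop_false]
  unfold cfsAlt
  rcases cfsSpan s.toList with ⟨p, r⟩
  cases r with
  | nil => simp
  | cons d r2 => by_cases hd : d = '.' <;> simp [hd]
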